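-- pv_equiv track=rewrite | github.com/gradiuscypher/advent-of-code | 2021/03/python/03-solution.py | calculate_epsilon
-- ===== SOURCE A (Python) =====
-- def calculate_epsilon(input_list):
--     bin_str = ""
--     index = 0
--
--     for i in range(0, len(input_list[0])):
--         zcount = 0
--         ocount = 0
--
--         for instr in input_list:
--             if instr[i] == '0':
--                 zcount += 1
--             elif instr[i] == '1':
--                 ocount += 1
--
--         # find which one to add
--         if zcount > ocount:
--             bin_str += '1'
--         else:
--             bin_str += '0'
--     return bin_str
-- ===== SOURCE B (Python) =====
-- def calculate_epsilon(input_list):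
--     width = len(input_list[0])
--     zcount = [0] * width
--     ocount = [0] * width
--     for instr in input_list:
--         row = instr[:width]
--         zcount = [z + (c == '0') for z, c in zip(zcount, row)]
--         ocount = [o + (c == '1') for o, c in zip(ocount, row)]
--     return ''.join('1' if z > o else '0' for z, o in zip(zcount, ocount))
-- ===== Notes on version B (the rewrite author's own statement) =====
-- stated objective: alternative
-- what changed: B inverts the loop nesting: instead of A's per-column rescan of the whole list, B makes a single pass over the rows maintaining per-column zero/one count tables and then renders the result string from the tables.
import Mathlib
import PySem

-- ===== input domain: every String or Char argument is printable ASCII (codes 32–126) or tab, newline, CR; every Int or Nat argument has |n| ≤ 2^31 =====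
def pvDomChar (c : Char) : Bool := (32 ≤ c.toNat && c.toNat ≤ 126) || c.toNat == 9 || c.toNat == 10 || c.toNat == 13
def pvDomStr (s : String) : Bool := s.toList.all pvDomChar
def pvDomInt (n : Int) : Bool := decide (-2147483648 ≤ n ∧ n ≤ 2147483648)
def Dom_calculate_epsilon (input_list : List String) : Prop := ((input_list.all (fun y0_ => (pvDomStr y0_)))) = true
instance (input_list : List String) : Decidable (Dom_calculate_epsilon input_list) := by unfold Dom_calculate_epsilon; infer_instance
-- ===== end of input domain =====

-- B replaces A's column-by-column rescans of the whole list by a single pass over the rows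
-- maintaining per-column zero/one count tables (different decomposition; same exact result).

-- ===== PORT A =====
-- per-row step of A's inner loop at column i (instr[i] = pyGet?; non-'0'/'1' chars ignored)
def epsStepA (i : Nat) (p : Nat × Nat) (instr : String) : Nat × Nat :=
  match PySem.Str.pyGet? instr (i : Int) with
  | some c => if c = '0' then (p.1 + 1, p.2) else if c = '1' then (p.1, p.2 + 1) else p
  | none => p

def calculate_epsilon (input_list : List String) : String :=
  String.mk ((List.range (input_list.headD "").toList.length).foldl
    (fun bin_str i =>
      let zo := input_list.foldl (epsStepA i) (0, 0)
      if zo.1 > zo.2 then bin_str ++ ['1'] else bin_str ++ ['0']) [])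

-- ===== PORT B =====
-- one row of B's single pass: row = instr[:width], then zip-update both count tables
def epsStepB (width : Nat) (p : List Nat × List Nat) (instr : String) : List Nat × List Nat :=
  let row := PySem.List.slice instr.toList none (some (width : Int))
  (List.zipWith (fun z c => z + (if c = '0' then 1 else 0)) p.1 row,
   List.zipWith (fun o c => o + (if c = '1' then 1 else 0)) p.2 row)

def calculate_epsilon_alt (input_list : List String) : String :=
  let width := (input_list.headD "").toList.length
  let counts := input_list.foldl (epsStepB width) (List.replicate width 0, List.replicate width 0)
  String.mk ((List.zip counts.1 counts.2).map (fun zo : Nat × Nat => if zo.1 > zo.2 then '1' else '0'))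

-- ===== PRECONDITION & SPEC =====
-- Pre_ excludes exactly the inputs where A raises IndexError: the empty list
-- (input_list[0]) and lists containing a string shorter than the first one (instr[i]).
def Pre_calculate_epsilon (input_list : List String) : Prop :=
  input_list ≠ [] ∧ ∀ s ∈ input_list, (input_list.headD "").toList.length ≤ s.toList.length
instance (input_list : List String) : Decidable (Pre_calculate_epsilon input_list) := by
  unfold Pre_calculate_epsilon; infer_instance

def pvWitness_calculate_epsilon : List String := ["10", "01", "00"]

def Spec_calculate_epsilon (input_list : List String) (out : String) : Prop := out = calculate_epsilon_alt input_list
instance (input_list : List String) (out : String) : Decidable (Spec_calculate_epsilon input_list out) := by unfold Spec_calculate_epsilon; infer_instance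

-- ===== CLAIM (what is proved, stated in full; the proofs are below) =====
def Claim_equal_calculate_epsilon : Prop := ∀ (input_list : List String), Dom_calculate_epsilon input_list → Pre_calculate_epsilon input_list → Spec_calculate_epsilon input_list (calculate_epsilon input_list)

-- ===== LEMMAS AND PROOFS =====

-- per-column counts: number of rows whose i-th char is '0' (resp. '1')
def czCount (i : Nat) (rows : List String) : Nat := rows.countP (fun s => s.toList[i]? == some '0')
def coCount (i : Nat) (rows : List String) : Nat := rows.countP (fun s => s.toList[i]? == some '1')

lemma innerA_eq (i : Nat) : ∀ (rows : List String) (p : Nat × Nat),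
    rows.foldl (epsStepA i) p = (p.1 + czCount i rows, p.2 + coCount i rows) := by
  intro rows
  induction rows with
  | nil => intro p; simp [czCount, coCount]
  | cons s rest ih =>
    intro p
    simp only [List.foldl_cons, ih, czCount, coCount, List.countP_cons]
    rcases h : s.toList[i]? with _ | c
    · simp [epsStepA, h]
    · by_cases h0 : c = '0'
      · subst h0; simp [epsStepA, h]; omega
      · by_cases h1 : c = '1'
        · subst h1; simp [epsStepA, h, h0]; omega
        · simp [epsStepA, h, h0, h1]

lemma foldl_build {β : Type} (g : List Char → β → List Char) (f : β → Char)
    (h : ∀ acc i, g acc i = acc ++ [f i]) : ∀ (l : List β) (acc : List Char),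
    l.foldl g acc = acc ++ l.map f := by
  intro l
  induction l with
  | nil => intro acc; simp
  | cons a l ih => intro acc; simp [List.foldl_cons, h, ih]

lemma B_counts (w : Nat) : ∀ (rows : List String), (∀ s ∈ rows, w ≤ s.toList.length) →
    ∀ (zl ol : List Nat), zl.length = w → ol.length = w →
    rows.foldl (epsStepB w) (zl, ol)
      = ((List.range w).map (fun i => zl.getD i 0 + czCount i rows),
         (List.range w).map (fun i => ol.getD i 0 + coCount i rows)) := by
  intro rows
  induction rows with
  | nil =>
    intro _ zl ol hz ho
    simp only [List.foldl_nil, czCount, coCount, List.countP_nil, Nat.add_zero]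
    have h : ∀ (l : List Nat), l.length = w → l = (List.range w).map (fun i => l.getD i 0) := by
      intro l hl
      apply List.ext_getElem
      · simp [hl]
      · intro i h1 h2
        simp only [List.getElem_map, List.getElem_range]
        rw [List.getD_eq_getElem _ _ (by omega : i < l.length)]
    rw [← h zl hz, ← h ol ho]
  | cons s rest ih =>
    intro hall zl ol hz ho
    have hs : w ≤ s.toList.length := hall s (by simp)
    have hrow : PySem.List.slice s.toList none (some ((w : Nat) : Int)) = s.toList.take w :=
      PySem.List.slice_to_natCast s.toList w
    have hrl : (s.toList.take w).length = w := by rw [List.length_take]; omega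
    simp only [List.foldl_cons, epsStepB, hrow]
    rw [ih (fun t ht => hall t (by simp [ht])) _ _
      (by simp [List.length_zipWith, hz, hrl]) (by simp [List.length_zipWith, ho, hrl])]
    refine Prod.ext ?_ ?_ <;> simp only <;> apply List.map_congr_left <;>
      intro i hi <;> simp only [List.mem_range] at hi
    · have h1 : i < (List.zipWith (fun z c => z + (if c = '0' then 1 else 0)) zl (s.toList.take w)).length := by
        simp [List.length_zipWith, hz, hrl]; omega
      rw [List.getD_eq_getElem _ _ h1, List.getElem_zipWith,
          List.getD_eq_getElem _ _ (by omega : i < zl.length)]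
      have hg : s.toList[i]? = some (s.toList[i]'(by omega)) := List.getElem?_eq_getElem (by omega)
      simp only [czCount, List.countP_cons, hg, List.getElem_take]
      by_cases h0 : s.toList[i]'(by omega) = '0' <;> simp [h0] <;> omega
    · have h1 : i < (List.zipWith (fun o c => o + (if c = '1' then 1 else 0)) ol (s.toList.take w)).length := by
        simp [List.length_zipWith, ho, hrl]; omega
      rw [List.getD_eq_getElem _ _ h1, List.getElem_zipWith,
          List.getD_eq_getElem _ _ (by omega : i < ol.length)]
      have hg : s.toList[i]? = some (s.toList[i]'(by omega)) := List.getElem?_eq_getElem (by omega)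
      simp only [coCount, List.countP_cons, hg, List.getElem_take]
      by_cases h1c : s.toList[i]'(by omega) = '1' <;> simp [h1c] <;> omega

-- ===== VERDICT (by name: the statement is the Claim_ definition above) =====
theorem calculate_epsilon_spec : Claim_equal_calculate_epsilon := by
  intro input_list _ hpre
  obtain ⟨hne, hall⟩ := hpre
  unfold Spec_calculate_epsilon calculate_epsilon calculate_epsilon_alt
  dsimp only
  rw [B_counts _ input_list hall _ _ (by simp) (by simp)]
  rw [foldl_build _
      (fun i => if (input_list.foldl (epsStepA i) (0, 0)).1 > (input_list.foldl (epsStepA i) (0, 0)).2 then '1' else '0')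
      (by intro acc i
          by_cases h : (input_list.foldl (epsStepA i) (0, 0)).1 > (input_list.foldl (epsStepA i) (0, 0)).2 <;>
            simp [h])]
  simp only [List.nil_append, List.zip_map', List.map_map]
  congr 1
  apply List.map_congr_left
  intro i hi
  have h0 : (List.replicate (input_list.headD "").toList.length (0 : Nat)).getD i 0 = 0 := by
    simp only [List.getD, List.getElem?_replicate]
    split <;> rfl
  simp only [Function.comp, innerA_eq, h0, Nat.zero_add]
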